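-- pv_equiv track=rewrite | github.com/claydeman/small-programs | sort.py | inoutmatrix
-- ===== SOURCE A (Python) =====
-- def inoutmatrix(a,t):
--     matrix=[[]for i in range(10)]
--     for i in range(len(a)-1,-1,-1):
--         ind=int(a[i][-t])
--         matrix[ind].append(a[i])
--     k=0
--     for i in range(10):
--         if matrix[i]!=[]:
--             for j in range(len(matrix[i])-1,-1,-1):
--                 a[k]=matrix[i][j]
--                 k+=1
--     return a
-- ===== SOURCE B (Python) =====
-- def inoutmatrix(a, t):
--     # Same stable digit ordering, via Python's stable sort on the digit key;
--     # updates a in place (like A) and returns it.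
--     a[:] = sorted(a, key=lambda s: int(s[-t]))
--     return a
-- ===== Notes on version B (the rewrite author's own statement) =====
-- stated objective: idiomatic
-- what changed: Replaced the hand-rolled ten-bucket distribution pass (with its double index-reversal and element-by-element write-back) by a single stable sorted() call keyed on the digit int(s[-t]), assigned back in place.
import Mathlib
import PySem

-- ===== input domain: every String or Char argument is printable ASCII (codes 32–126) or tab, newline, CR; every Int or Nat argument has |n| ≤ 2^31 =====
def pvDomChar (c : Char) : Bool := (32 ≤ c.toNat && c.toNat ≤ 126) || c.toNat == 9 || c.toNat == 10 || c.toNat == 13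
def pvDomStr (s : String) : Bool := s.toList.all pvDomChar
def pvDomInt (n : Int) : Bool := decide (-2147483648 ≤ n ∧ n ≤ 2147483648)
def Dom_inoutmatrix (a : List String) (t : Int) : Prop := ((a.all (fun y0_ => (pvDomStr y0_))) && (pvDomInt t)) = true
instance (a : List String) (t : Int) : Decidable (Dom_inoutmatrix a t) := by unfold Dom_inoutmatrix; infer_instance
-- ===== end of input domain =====

-- B replaces A's hand-rolled ten-bucket digit distribution by Python's stable sorted() on the
-- digit key int(s[-t]) (idiomatic; not claimed faster); like A it updates the list in place and
-- returns it, and the theorems below are about the returned value.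

-- ===== PORT A =====
def inoutmatrix (a : List String) (t : Int) : List String :=
  -- matrix = [[] for i in range(10)]
  let matrix0 : List (List String) := (List.range 10).map (fun _ => ([] : List String))
  -- for i in range(len(a)-1,-1,-1): ind=int(a[i][-t]); matrix[ind].append(a[i])
  let matrix := (PySem.List.pyRange (PySem.List.len a - 1) (-1) (-1)).foldl
      (fun m i =>
        let ind := ((PySem.Str.pyGet? (PySem.List.pyGetD a i "") (-t)).bind
                      (fun c => PySem.Int.ofChars? [c])).getD 0
        PySem.List.pySetD m ind (PySem.List.pyGetD m ind [] ++ [PySem.List.pyGetD a i ""]))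
      matrix0
  -- k=0; for i in range(10): if matrix[i]!=[]: for j in range(len(matrix[i])-1,-1,-1): a[k]=matrix[i][j]; k+=1
  let st := (PySem.List.pyRange 0 10 1).foldl
      (fun (st : List String × Int) i =>
        let bucket := PySem.List.pyGetD matrix i []
        if bucket ≠ [] then
          (PySem.List.pyRange (PySem.List.len bucket - 1) (-1) (-1)).foldl
            (fun st2 j => (PySem.List.pySetD st2.1 st2.2 (PySem.List.pyGetD bucket j ""), st2.2 + 1))
            st
        else st)
      (a, (0 : Int))
  st.1

-- ===== PORT B =====
-- key=lambda s: int(s[-t])  (total here; Pre_ guarantees the lookup and parse succeed)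
def pyDigitKey (t : Int) (s : String) : Int :=
  ((PySem.Str.pyGet? s (-t)).bind (fun c => PySem.Int.ofChars? [c])).getD 0

-- a[:] = sorted(a, key=lambda s: int(s[-t])); return a
def inoutmatrix_alt (a : List String) (t : Int) : List String :=
  PySem.List.sorted a (pyDigitKey t) false

-- ===== PRECONDITION & SPEC =====
-- Pre_: every a[i][-t] exists (no IndexError) and is a decimal digit (no ValueError from int()).
def Pre_inoutmatrix (a : List String) (t : Int) : Prop :=
  (a.all (fun s => ((PySem.Str.pyGet? s (-t)).map Char.isDigit).getD false)) = true
instance (a : List String) (t : Int) : Decidable (Pre_inoutmatrix a t) := by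
  unfold Pre_inoutmatrix; infer_instance

def pvWitness_inoutmatrix : List String × Int := (["13", "21", "11", "33", "21"], 1)

def Spec_inoutmatrix (a : List String) (t : Int) (out : List String) : Prop := out = inoutmatrix_alt a t
instance (a : List String) (t : Int) (out : List String) : Decidable (Spec_inoutmatrix a t out) := by
  unfold Spec_inoutmatrix; infer_instance

-- ===== CLAIM (what is proved, stated in full; the proofs are below) =====
def Claim_equal_inoutmatrix : Prop := ∀ (a : List String) (t : Int), Dom_inoutmatrix a t → Pre_inoutmatrix a t → Spec_inoutmatrix a t (inoutmatrix a t)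

-- ===== LEMMAS AND PROOFS =====

-- the canonical value both ports are reduced to: the digit buckets 0..9 concatenated,
-- each bucket keeping its elements in original order
def pvF (t : Int) (a : List String) (d : Int) : List String :=
  a.filter (fun s => pyDigitKey t s == d)
def pvC (t : Int) (a : List String) : List String :=
  (PySem.List.pyRange 0 10 1).flatMap (pvF t a)

-- basic facts about the digit key -------------------------------------------------------------

theorem pv_digit_cases (c : Char) (h : c.isDigit = true) :
    c = '0' ∨ c = '1' ∨ c = '2' ∨ c = '3' ∨ c = '4' ∨ c = '5' ∨ c = '6' ∨ c = '7' ∨ c = '8' ∨ c = '9' := by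
  have h' : 48 ≤ c.toNat ∧ c.toNat ≤ 57 := by
    revert h; unfold Char.isDigit
    simp only [Bool.and_eq_true, decide_eq_true_eq, Char.toNat]
    intro h; exact ⟨h.1, h.2⟩
  have hofnat : Char.ofNat c.toNat = c := Char.ofNat_toNat c
  have hlo := h'.1; have hhi := h'.2
  interval_cases hn : c.toNat <;> (rw [← hofnat]; decide)

theorem pv_ofChars_digit (c : Char) (h : c.isDigit = true) :
    PySem.Int.ofChars? [c] = some ((c.toNat : Int) - 48) := by
  rcases pv_digit_cases c h with h|h|h|h|h|h|h|h|h|h <;> subst h <;> decide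

theorem pv_key_bounds (t : Int) (s : String)
    (h : ((PySem.Str.pyGet? s (-t)).map Char.isDigit).getD false = true) :
    0 ≤ pyDigitKey t s ∧ pyDigitKey t s < 10 := by
  unfold pyDigitKey
  cases hg : PySem.Str.pyGet? s (-t) with
  | none => rw [hg] at h; simp at h
  | some c =>
    rw [hg] at h
    simp only [Option.map_some, Option.getD_some] at h
    have hb : 48 ≤ c.toNat ∧ c.toNat ≤ 57 := by
      revert h; unfold Char.isDigit
      simp only [Bool.and_eq_true, decide_eq_true_eq, Char.toNat]
      intro h; exact ⟨h.1, h.2⟩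
    simp only [Option.bind_some, pv_ofChars_digit c h, Option.getD_some]
    omega

-- generic loop-shape facts --------------------------------------------------------------------

theorem pv_foldr_congr_mem {α β : Type} (l : List α) (f g : α → β → β)
    (h : ∀ x ∈ l, ∀ b, f x b = g x b) (b : β) : l.foldr f b = l.foldr g b := by
  induction l with
  | nil => rfl
  | cons y l ih =>
    simp only [List.foldr_cons]
    rw [ih (fun x hx b => h x (List.mem_cons_of_mem _ hx) b), h y (List.mem_cons_self) _]

-- an index loop 'for i in range(len(xs)-1,-1,-1): … xs[i] …', read right to left, is a foldr over xs
theorem pv_foldr_index {β : Type} (xs : List String) (g : String → β → β) (init : β) :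
    (PySem.List.pyRange 0 (PySem.List.len xs) 1).foldr (fun i acc => g (PySem.List.pyGetD xs i "") acc) init
      = xs.foldr g init := by
  induction xs using List.reverseRecOn generalizing init with
  | nil => simp [PySem.List.pyRange]
  | append_singleton xs x ih =>
    have hlen : PySem.List.len (xs ++ [x]) = PySem.List.len xs + 1 := by
      simp [PySem.List.len_eq]
    rw [hlen, PySem.List.pyRange_one_succ_right (by simp [PySem.List.len_eq]),
        List.foldr_append]
    have hget : PySem.List.pyGetD (xs ++ [x]) (PySem.List.len xs) "" = x := by
      rw [PySem.List.len_eq, PySem.List.pyGetD_natCast]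
      simp
    simp only [List.foldr_cons, List.foldr_nil, hget]
    rw [pv_foldr_congr_mem _ _ (fun i acc => g (PySem.List.pyGetD xs i "") acc)
      (by
        intro i hi b
        have hmem := (PySem.List.mem_pyRange_one).mp hi
        have h1 : i < (xs.length : Int) := by
          have := hmem.2; rwa [PySem.List.len_eq] at this
        simp only []
        rw [PySem.List.pyGetD_of_nonneg _ _ hmem.1, PySem.List.pyGetD_of_nonneg _ _ hmem.1]
        rw [List.getD_append]
        omega)]
    rw [ih, List.foldr_append]
    simp

-- A's first loop builds the ten buckets, each reversed ----------------------------------------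

theorem pv_matrix_eq (t : Int) (a : List String)
    (h : ∀ s ∈ a, 0 ≤ pyDigitKey t s ∧ pyDigitKey t s < 10) :
    a.foldr (fun s m => PySem.List.pySetD m (pyDigitKey t s)
        (PySem.List.pyGetD m (pyDigitKey t s) [] ++ [s]))
      ((List.range 10).map (fun _ => ([] : List String)))
    = (List.range 10).map (fun (d : Nat) => (pvF t a ((d : Nat) : Int)).reverse) := by
  induction a with
  | nil => simp [pvF]
  | cons s rest ih =>
    have hs := h s (List.mem_cons_self)
    have hrest : ∀ x ∈ rest, 0 ≤ pyDigitKey t x ∧ pyDigitKey t x < 10 :=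
      fun x hx => h x (List.mem_cons_of_mem _ hx)
    simp only [List.foldr_cons, ih hrest]
    set kx := pyDigitKey t s with hk
    have hget : PySem.List.pyGetD ((List.range 10).map (fun (d : Nat) => (pvF t rest (d : Int)).reverse)) kx []
        = (pvF t rest kx).reverse := by
      rw [PySem.List.pyGetD_of_nonneg _ _ hs.1]
      rw [PySem.List.getD_map_range _ _ _ _ (by omega)]
      congr 2
      omega
    rw [hget, PySem.List.pySetD_of_nonneg _ _ hs.1]
    apply List.ext_getElem
    · simp
    · intro i hi1 hi2
      simp only [List.length_map, List.length_range] at hi2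
      rw [List.getElem_set]
      by_cases hik : kx.toNat = i
      · rw [if_pos hik]
        rw [List.getElem_map]
        simp only [List.getElem_range]
        have hki : kx = (i : Int) := by omega
        unfold pvF
        rw [List.filter_cons]
        rw [show (pyDigitKey t s == (i : Int)) = true by rw [beq_iff_eq, ← hk, hki]]
        simp [← hki]
      · rw [if_neg hik, List.getElem_map, List.getElem_map]
        simp only [List.getElem_range]
        unfold pvF
        rw [List.filter_cons]
        rw [show (pyDigitKey t s == (i : Int)) = false by rw [beq_eq_false_iff_ne, ← hk]; omega]
        simp

-- A's write-back loop: writing ys at positions kn, kn+1, … ------------------------------------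

theorem pv_write_seq : ∀ (ys cur : List String) (kn : Nat), kn + ys.length ≤ cur.length →
    ys.foldl (fun (st : List String × Int) y => (PySem.List.pySetD st.1 st.2 y, st.2 + 1)) (cur, ((kn : Nat) : Int))
      = (cur.take kn ++ ys ++ cur.drop (kn + ys.length), ((kn + ys.length : Nat) : Int)) := by
  intro ys
  induction ys with
  | nil => intro cur kn h; simp
  | cons y ys ih =>
    intro cur kn h
    simp only [List.length_cons] at h
    simp only [List.foldl_cons]
    rw [PySem.List.pySetD_natCast]
    have h1 : ((kn : Int) + 1) = ((kn + 1 : Nat) : Int) := by push_cast; ring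
    rw [h1, ih (cur.set kn y) (kn + 1) (by simp; omega)]
    have hkn : kn < cur.length := by omega
    have htake : (cur.set kn y).take (kn + 1) = cur.take kn ++ [y] := by
      rw [List.take_set, List.take_add_one]
      simp only [List.getElem?_eq_getElem hkn, Option.toList_some]
      rw [List.set_append]
      simp [Nat.min_eq_left (Nat.le_of_lt hkn)]
    have hdrop : (cur.set kn y).drop (kn + 1 + ys.length) = cur.drop (kn + (y :: ys).length) := by
      rw [List.drop_set, if_pos (by omega)]
      congr 1
      simp; omega
    rw [htake, hdrop]
    rw [Prod.mk.injEq]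
    refine ⟨by simp, by congr 1; simp; omega⟩

-- the first m buckets are a prefix of pvC, so their total length is at most |a| --------------

theorem pv_prefix_le (t : Int) (a : List String) (hC : (pvC t a).length = a.length)
    (m : Nat) (hm : m ≤ 10) :
    ((PySem.List.pyRange 0 (m : Int) 1).flatMap (pvF t a)).length ≤ a.length := by
  have hsplit : PySem.List.pyRange 0 10 1
      = PySem.List.pyRange 0 (m : Int) 1 ++ PySem.List.pyRange (m : Int) 10 1 :=
    PySem.List.pyRange_one_append 0 (m : Int) 10 (by omega) (by omega)
  have : (pvC t a).length
      = ((PySem.List.pyRange 0 (m : Int) 1).flatMap (pvF t a)).length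
        + ((PySem.List.pyRange (m : Int) 10 1).flatMap (pvF t a)).length := by
    unfold pvC; rw [hsplit, List.flatMap_append, List.length_append]
  omega

-- A's second loop, processed for the first m digits -------------------------------------------

theorem pv_outer (t : Int) (a : List String)
    (hC : (pvC t a).length = a.length) :
    ∀ (m : Nat), m ≤ 10 →
    (PySem.List.pyRange 0 (m : Int) 1).foldl
      (fun (st : List String × Int) i =>
        let bucket := PySem.List.pyGetD
          ((List.range 10).map (fun (d : Nat) => (pvF t a ((d : Nat) : Int)).reverse)) i []
        if bucket ≠ [] then
          (PySem.List.pyRange (PySem.List.len bucket - 1) (-1) (-1)).foldl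
            (fun st2 j => (PySem.List.pySetD st2.1 st2.2 (PySem.List.pyGetD bucket j ""), st2.2 + 1))
            st
        else st)
      (a, (0 : Int))
    = (((PySem.List.pyRange 0 (m : Int) 1).flatMap (pvF t a)) ++ a.drop ((PySem.List.pyRange 0 (m : Int) 1).flatMap (pvF t a)).length,
       ((((PySem.List.pyRange 0 (m : Int) 1).flatMap (pvF t a)).length : Nat) : Int)) := by
  intro m
  induction m with
  | zero => intro _; simp [PySem.List.pyRange]
  | succ m ih =>
    intro hm1
    have hm : m ≤ 10 := by omega
    have hmlt : m < 10 := by omega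
    have hcast : ((m + 1 : Nat) : Int) = (m : Int) + 1 := by push_cast; ring
    rw [hcast, PySem.List.pyRange_one_succ_right (by omega)]
    rw [List.flatMap_append]
    simp only [List.flatMap_cons, List.flatMap_nil, List.append_nil]
    rw [List.foldl_append, ih hm]
    simp only [List.foldl_cons, List.foldl_nil]
    have hbucket : PySem.List.pyGetD
        ((List.range 10).map (fun (d : Nat) => (pvF t a ((d : Nat) : Int)).reverse)) (m : Int) []
        = (pvF t a (m : Int)).reverse := by
      rw [PySem.List.pyGetD_natCast]
      rw [List.getD_eq_getElem _ _ (by simp; omega)]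
      rw [List.getElem_map]
      simp
    set Cm := (PySem.List.pyRange 0 (m : Int) 1).flatMap (pvF t a) with hCm
    set F := pvF t a (m : Int) with hF
    have hlen1 : Cm.length + F.length ≤ a.length := by
      have h2 := pv_prefix_le t a hC (m + 1) (by omega)
      rw [hcast, PySem.List.pyRange_one_succ_right (by omega), List.flatMap_append] at h2
      simp only [List.flatMap_cons, List.flatMap_nil, List.append_nil, List.length_append] at h2
      exact h2
    simp only [hbucket]
    by_cases hFnil : F.reverse = []
    · rw [if_neg (by simpa using hFnil)]
      have hF0 : F = [] := by simpa using hFnil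
      rw [hF0]
      simp
    · rw [if_pos (by simpa using hFnil)]
      have hrev : PySem.List.pyRange (PySem.List.len F.reverse - 1) (-1) (-1)
          = (PySem.List.pyRange 0 (PySem.List.len F.reverse) 1).reverse := by
        rw [PySem.List.pyRange_neg_one_eq_reverse]
        congr 2
        omega
      rw [hrev, List.foldl_reverse]
      rw [pv_foldr_index F.reverse
        (fun y st2 => (PySem.List.pySetD st2.1 st2.2 y, st2.2 + 1))]
      rw [← List.foldl_reverse, List.reverse_reverse]
      have hknlen : Cm.length + F.length ≤ (Cm ++ a.drop Cm.length).length := by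
        simp
        omega
      rw [pv_write_seq F (Cm ++ a.drop Cm.length) Cm.length hknlen]
      rw [Prod.mk.injEq]
      constructor
      · rw [List.take_left' rfl]
        rw [List.drop_append]
        rw [List.drop_of_length_le (by simp)]
        rw [List.drop_drop]
        rw [List.nil_append]
        congr 1
        simp
      · congr 1
        simp

-- B's side: a stable insertion sort on 0..9 keys is the bucket concatenation -------------------

theorem pv_insertBy_skip {α : Type} (before : α → α → Bool) (x : α) :
    ∀ (p rest : List α), (∀ y ∈ p, before x y = false) →
    PySem.List.insertBy before x (p ++ rest) = p ++ PySem.List.insertBy before x rest := by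
  intro p
  induction p with
  | nil => intro rest _; simp
  | cons y p ih =>
    intro rest h
    simp only [List.cons_append, PySem.List.insertBy]
    rw [h y (List.mem_cons_self)]
    simp only [Bool.false_eq_true, if_false]
    rw [ih rest (fun z hz => h z (List.mem_cons_of_mem _ hz))]

theorem pv_insertBy_front {α : Type} (before : α → α → Bool) (x : α) :
    ∀ (l : List α), (∀ y ∈ l, before x y = true) →
    PySem.List.insertBy before x l = x :: l := by
  intro l h
  cases l with
  | nil => rfl
  | cons y l => simp [PySem.List.insertBy, h y (List.mem_cons_self)]

theorem pv_insert_canon (t : Int) (xs : List String) (x : String)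
    (hx : 0 ≤ pyDigitKey t x ∧ pyDigitKey t x < 10) :
    PySem.List.insertBy (fun p q => decide (pyDigitKey t p < pyDigitKey t q)) x (pvC t xs)
      = pvC t (xs ++ [x]) := by
  set kx := pyDigitKey t x with hkx
  have hsplit : PySem.List.pyRange 0 10 1
      = PySem.List.pyRange 0 (kx + 1) 1 ++ PySem.List.pyRange (kx + 1) 10 1 :=
    PySem.List.pyRange_one_append 0 (kx + 1) 10 (by omega) (by omega)
  have hlow : PySem.List.pyRange 0 (kx + 1) 1
      = PySem.List.pyRange 0 kx 1 ++ [kx] :=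
    PySem.List.pyRange_one_succ_right (by omega)
  have hkey : ∀ (a : List String) (d y : _), y ∈ pvF t a d → pyDigitKey t y = d := by
    intro a d y hy
    have := List.mem_filter.mp hy
    exact beq_iff_eq.mp this.2
  unfold pvC
  rw [hsplit, List.flatMap_append, pv_insertBy_skip, pv_insertBy_front]
  · rw [hlow]
    rw [List.flatMap_append, List.flatMap_append]
    have hfnew : ∀ d : Int, d ≠ kx → pvF t (xs ++ [x]) d = pvF t xs d := by
      intro d hd
      unfold pvF
      rw [List.filter_append]
      have hb : (pyDigitKey t x == d) = false := by
        rw [beq_eq_false_iff_ne, ← hkx]; exact fun h => hd h.symm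
      simp [hb]
    have hfkx : pvF t (xs ++ [x]) kx = pvF t xs kx ++ [x] := by
      unfold pvF
      rw [List.filter_append]
      have hb : (pyDigitKey t x == kx) = true := by rw [beq_iff_eq, ← hkx]
      simp [hb]
    have hA0 : (PySem.List.pyRange 0 kx 1).flatMap (pvF t (xs ++ [x]))
        = (PySem.List.pyRange 0 kx 1).flatMap (pvF t xs) := by
      rw [List.flatMap_def, List.flatMap_def]
      congr 1
      apply List.map_congr_left
      intro d hd
      have hdm := (PySem.List.mem_pyRange_one).mp hd
      exact hfnew d (by omega)
    have hH : (PySem.List.pyRange (kx + 1) 10 1).flatMap (pvF t (xs ++ [x]))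
        = (PySem.List.pyRange (kx + 1) 10 1).flatMap (pvF t xs) := by
      rw [List.flatMap_def, List.flatMap_def]
      congr 1
      apply List.map_congr_left
      intro d hd
      have hdm := (PySem.List.mem_pyRange_one).mp hd
      exact hfnew d (by omega)
    rw [List.flatMap_append, hA0, hH]
    simp only [List.flatMap_cons, List.flatMap_nil, hfkx]
    simp
  · intro y hy
    rcases List.mem_flatMap.mp hy with ⟨d, hd, hyF⟩
    have hdm := (PySem.List.mem_pyRange_one).mp hd
    have := hkey _ _ _ hyF
    simp only [decide_eq_true_eq]
    omega
  · intro y hy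
    rcases List.mem_flatMap.mp hy with ⟨d, hd, hyF⟩
    have hdm := (PySem.List.mem_pyRange_one).mp hd
    have := hkey _ _ _ hyF
    simp only [decide_eq_false_iff_not]
    omega

theorem pv_B_eq_canon (t : Int) (a : List String)
    (h : ∀ s ∈ a, 0 ≤ pyDigitKey t s ∧ pyDigitKey t s < 10) :
    PySem.List.sorted a (pyDigitKey t) false = pvC t a := by
  rw [PySem.List.sorted_eq_foldl_insertBy]
  induction a using List.reverseRecOn with
  | nil => simp [pvC, pvF]
  | append_singleton xs x ih =>
    rw [List.foldl_append]
    simp only [List.foldl_cons, List.foldl_nil]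
    rw [ih (fun s hs => h s (List.mem_append_left _ hs))]
    exact pv_insert_canon t xs x (h x (List.mem_append_right _ (List.mem_cons_self)))

theorem pv_B_len (t : Int) (a : List String)
    (h : ∀ s ∈ a, 0 ≤ pyDigitKey t s ∧ pyDigitKey t s < 10) :
    (pvC t a).length = a.length := by
  rw [← pv_B_eq_canon t a h]
  exact PySem.List.length_sorted a (pyDigitKey t) false

-- the two sides -------------------------------------------------------------------------------

theorem pv_A_eq_canon (a : List String) (t : Int)
    (h : ∀ s ∈ a, 0 ≤ pyDigitKey t s ∧ pyDigitKey t s < 10) :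
    inoutmatrix a t = pvC t a := by
  unfold inoutmatrix
  simp only []
  have hrev : PySem.List.pyRange (PySem.List.len a - 1) (-1) (-1)
      = (PySem.List.pyRange 0 (PySem.List.len a) 1).reverse := by
    rw [PySem.List.pyRange_neg_one_eq_reverse]
    congr 2
    omega
  rw [hrev, List.foldl_reverse]
  rw [pv_foldr_index a
    (fun s m => PySem.List.pySetD m
      (((PySem.Str.pyGet? s (-t)).bind (fun c => PySem.Int.ofChars? [c])).getD 0)
      (PySem.List.pyGetD m (((PySem.Str.pyGet? s (-t)).bind (fun c => PySem.Int.ofChars? [c])).getD 0) [] ++ [s]))]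
  simp only [← pyDigitKey.eq_def]
  rw [pv_matrix_eq t a h]
  have h10 : (10 : Int) = ((10 : Nat) : Int) := by norm_num
  rw [h10, pv_outer t a (pv_B_len t a h) 10 (by omega)]
  have hCfull : (PySem.List.pyRange 0 ((10:Nat) : Int) 1).flatMap (pvF t a) = pvC t a := by
    rw [← h10]; rfl
  rw [hCfull]
  simp [pv_B_len t a h]

-- ===== VERDICT (by name: the statement is the Claim_ definition above) =====
theorem inoutmatrix_spec : Claim_equal_inoutmatrix := by
  intro a t _hdom hpre
  unfold Spec_inoutmatrix
  have hb : ∀ s ∈ a, 0 ≤ pyDigitKey t s ∧ pyDigitKey t s < 10 := by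
    intro s hs
    have := (List.all_eq_true.mp hpre) s hs
    exact pv_key_bounds t s (by simpa using this)
  rw [pv_A_eq_canon a t hb]
  unfold inoutmatrix_alt
  rw [pv_B_eq_canon t a hb]
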